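-- pv_equiv track=rewrite | github.com/vValkroVv/unlearning | src/tools/build_results_combine_tables.py | build_direction_text
-- ===== SOURCE A (Python) =====
-- METRIC_DIRECTION = {
--     "forget_qa_rouge": r"$\downarrow$",
--     "holdout_qa_rouge": r"$\uparrow$",
--     "forget_wrong_gen_rate": r"$\downarrow$",
--     "holdout_wrong_gen_rate": r"$\downarrow$",
--     "forget_qa_cos_sim": r"$\downarrow$",
--     "holdout_qa_cos_sim": r"$\uparrow$",
--     "utility_avg": r"$\uparrow$",
-- }
--
-- def build_direction_text(metrics: list[tuple[str, str]]) -> str: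
--     lower = [metric_abbrev for metric_name, metric_abbrev in metrics if METRIC_DIRECTION.get(metric_name) == r"$\downarrow$"]
--     higher = [
--         metric_abbrev
--         for metric_name, metric_abbrev in metrics
--         if METRIC_DIRECTION.get(metric_name, r"$\uparrow$") == r"$\uparrow$"
--     ]
--     if lower and higher:
--         return (
--             rf"{{\tiny Values are percentages. {' / '.join(lower)} are lower-is-better; "
--             rf"{' / '.join(higher)} are higher-is-better.}}"
--         )
--     if lower:
--         return rf"{{\tiny Values are percentages. {' / '.join(lower)} are lower-is-better.}}"
--     if higher:
--         return rf"{{\tiny Values are percentages. {' / '.join(higher)} are higher-is-better.}}"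
--     return r"{\tiny Values are percentages.}"
-- ===== SOURCE B (Python) =====
-- METRIC_DIRECTION = {
--     "forget_qa_rouge": r"$\downarrow$",
--     "holdout_qa_rouge": r"$\uparrow$",
--     "forget_wrong_gen_rate": r"$\downarrow$",
--     "holdout_wrong_gen_rate": r"$\downarrow$",
--     "forget_qa_cos_sim": r"$\downarrow$",
--     "holdout_qa_cos_sim": r"$\uparrow$",
--     "utility_avg": r"$\uparrow$",
-- }
--
-- def build_direction_text(metrics: list[tuple[str, str]]) -> str:
--     # Build the two " / "-joined phrases directly, back to front, with no
--     # intermediate lists and no join(): an Optional[str] accumulator per side.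
--     lo = hi = None
--     for name, abbrev in reversed(metrics):
--         if METRIC_DIRECTION.get(name) == r"$\downarrow$":
--             lo = abbrev if lo is None else abbrev + " / " + lo
--         else:
--             hi = abbrev if hi is None else abbrev + " / " + hi
--     if lo is not None and hi is not None:
--         return ("{\\tiny Values are percentages. " + lo + " are lower-is-better; "
--                 + hi + " are higher-is-better.}")
--     if lo is not None:
--         return "{\\tiny Values are percentages. " + lo + " are lower-is-better.}"
--     if hi is not None:
--         return "{\\tiny Values are percentages. " + hi + " are higher-is-better.}"
--     return r"{\tiny Values are percentages.}"
-- ===== Notes on version B (the rewrite author's own statement) =====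
-- stated objective: alternative
-- what changed: Instead of A's two filtered list comprehensions plus ' / '.join, B walks the metrics back-to-front once and builds each joined phrase directly in an Optional[str] accumulator (prepending 'abbrev + " / "'), so no intermediate lists and no join() exist; emptiness tests become None tests.
import Mathlib
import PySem

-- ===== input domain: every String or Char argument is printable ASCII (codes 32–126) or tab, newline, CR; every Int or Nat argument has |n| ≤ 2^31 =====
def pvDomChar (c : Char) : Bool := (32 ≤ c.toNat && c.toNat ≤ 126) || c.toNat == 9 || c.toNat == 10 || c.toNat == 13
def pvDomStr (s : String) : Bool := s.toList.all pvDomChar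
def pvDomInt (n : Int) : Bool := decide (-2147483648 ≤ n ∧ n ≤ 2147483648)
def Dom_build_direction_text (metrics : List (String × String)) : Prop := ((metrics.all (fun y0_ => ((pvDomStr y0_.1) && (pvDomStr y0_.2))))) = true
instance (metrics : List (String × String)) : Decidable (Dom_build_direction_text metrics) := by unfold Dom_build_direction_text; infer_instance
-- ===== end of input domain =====

-- B builds each " / "-joined phrase directly in an Option String accumulator, back to front,
-- instead of A's two filtered lists plus join; objective: alternative (same cost).

-- ===== PORT A =====
def pvDown : String := "$\\downarrow$"
def pvUp : String := "$\\uparrow$"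
def METRIC_DIRECTION : PySem.Dict String String :=
  PySem.Dict.ofList
    [("forget_qa_rouge", pvDown),
     ("holdout_qa_rouge", pvUp),
     ("forget_wrong_gen_rate", pvDown),
     ("holdout_wrong_gen_rate", pvDown),
     ("forget_qa_cos_sim", pvDown),
     ("holdout_qa_cos_sim", pvUp),
     ("utility_avg", pvUp)]

def build_direction_text (metrics : List (String × String)) : String :=
  let lower := (metrics.filter (fun p => METRIC_DIRECTION.get? p.1 == some pvDown)).map (·.2)
  let higher := (metrics.filter (fun p => METRIC_DIRECTION.getD p.1 pvUp == pvUp)).map (·.2)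
  if !lower.isEmpty && !higher.isEmpty then
    "{\\tiny Values are percentages. " ++ PySem.Str.join " / " lower ++ " are lower-is-better; "
      ++ PySem.Str.join " / " higher ++ " are higher-is-better.}"
  else if !lower.isEmpty then
    "{\\tiny Values are percentages. " ++ PySem.Str.join " / " lower ++ " are lower-is-better.}"
  else if !higher.isEmpty then
    "{\\tiny Values are percentages. " ++ PySem.Str.join " / " higher ++ " are higher-is-better.}"
  else
    "{\\tiny Values are percentages.}"

-- ===== PORT B =====
-- one reversed-iteration step: prepend the abbrev (with " / " if the phrase already exists)
def pvStep (p : String × String) (acc : Option String × Option String) : Option String × Option String :=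
  if METRIC_DIRECTION.get? p.1 == some pvDown then
    (some (match acc.1 with | none => p.2 | some s => p.2 ++ " / " ++ s), acc.2)
  else
    (acc.1, some (match acc.2 with | none => p.2 | some s => p.2 ++ " / " ++ s))

def build_direction_text_alt (metrics : List (String × String)) : String :=
  match metrics.foldr pvStep (none, none) with
  | (some lo, some hi) =>
    "{\\tiny Values are percentages. " ++ lo ++ " are lower-is-better; "
      ++ hi ++ " are higher-is-better.}"
  | (some lo, none) =>
    "{\\tiny Values are percentages. " ++ lo ++ " are lower-is-better.}"
  | (none, some hi) =>
    "{\\tiny Values are percentages. " ++ hi ++ " are higher-is-better.}"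
  | (none, none) => "{\\tiny Values are percentages.}"

-- ===== PRECONDITION & SPEC =====
def Spec_build_direction_text (metrics : List (String × String)) (out : String) : Prop := out = build_direction_text_alt metrics
instance (metrics : List (String × String)) (out : String) : Decidable (Spec_build_direction_text metrics out) := by unfold Spec_build_direction_text; infer_instance

-- ===== CLAIM (what is proved, stated in full; the proofs are below) =====
def Claim_equal_build_direction_text : Prop := ∀ (metrics : List (String × String)), Dom_build_direction_text metrics → Spec_build_direction_text metrics (build_direction_text metrics)

-- ===== LEMMAS AND PROOFS =====

-- the joined phrase of a list, as an Option (none ↔ the list is empty)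
def pvOptJoin : List String → Option String
  | [] => none
  | l@(_ :: _) => some (PySem.Str.join " / " l)

theorem pv_dict_items : METRIC_DIRECTION = PySem.Dict.mk
    [("forget_qa_rouge", pvDown), ("holdout_qa_rouge", pvUp),
     ("forget_wrong_gen_rate", pvDown), ("holdout_wrong_gen_rate", pvDown),
     ("forget_qa_cos_sim", pvDown), ("holdout_qa_cos_sim", pvUp),
     ("utility_avg", pvUp)] := by decide

-- the dict only holds pvDown/pvUp, so "getD n pvUp == pvUp" negates "get? n == some pvDown"
theorem pv_dir_compl (n : String) :
    (METRIC_DIRECTION.getD n pvUp == pvUp) = !(METRIC_DIRECTION.get? n == some pvDown) := by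
  rw [pv_dict_items]
  simp only [PySem.Dict.getD_eq_get?_getD, PySem.Dict.get?_mk_cons]
  split_ifs <;> simp [PySem.Dict.get?, pvDown, pvUp]

theorem pv_filter_hi (ms : List (String × String)) :
    ms.filter (fun p => METRIC_DIRECTION.getD p.1 pvUp == pvUp)
      = ms.filter (fun p => !(METRIC_DIRECTION.get? p.1 == some pvDown)) :=
  List.filter_congr (fun p _ => pv_dir_compl p.1)

theorem pv_optJoin_prepend (x : String) (l : List String) :
    (some (match pvOptJoin l with | none => x | some s => x ++ " / " ++ s) : Option String)
      = pvOptJoin (x :: l) := by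
  cases l with
  | nil => simp [pvOptJoin, PySem.Str.join]
  | cons a t =>
    simp only [pvOptJoin, Option.some.injEq]
    simp only [PySem.Str.join, PySem.Chars.join_cons_cons, List.map_cons]
    simp only [String.ofList_append, String.ofList_toList, String.append_assoc]

theorem pv_foldr_split (ms : List (String × String)) :
    ms.foldr pvStep (none, none)
      = (pvOptJoin ((ms.filter (fun p => METRIC_DIRECTION.get? p.1 == some pvDown)).map (·.2)),
         pvOptJoin ((ms.filter (fun p => !(METRIC_DIRECTION.get? p.1 == some pvDown))).map (·.2))) := by
  induction ms with
  | nil => simp [pvOptJoin]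
  | cons p ms ih =>
    rw [List.foldr_cons, ih]
    unfold pvStep
    cases hc : (METRIC_DIRECTION.get? p.1 == some pvDown)
    · rw [if_neg (by simp [hc])]
      simp only [List.filter_cons, hc, Bool.not_false, if_pos, Bool.false_eq_true, if_false,
        List.map_cons]
      rw [← pv_optJoin_prepend]
    · rw [if_pos (by simp_all)]
      simp only [List.filter_cons, hc, Bool.not_true, if_pos, Bool.false_eq_true, if_false,
        List.map_cons]
      rw [← pv_optJoin_prepend]

-- ===== VERDICT (by name: the statement is the Claim_ definition above) =====
theorem build_direction_text_spec : Claim_equal_build_direction_text := by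
  intro metrics _
  unfold Spec_build_direction_text build_direction_text build_direction_text_alt
  rw [pv_foldr_split, pv_filter_hi]
  cases (metrics.filter (fun p => METRIC_DIRECTION.get? p.1 == some pvDown)).map (·.2) with
  | nil =>
    cases (metrics.filter (fun p => !(METRIC_DIRECTION.get? p.1 == some pvDown))).map (·.2) with
    | nil => simp [pvOptJoin]
    | cons a t => simp [pvOptJoin]
  | cons a t =>
    cases (metrics.filter (fun p => !(METRIC_DIRECTION.get? p.1 == some pvDown))).map (·.2) with
    | nil => simp [pvOptJoin]
    | cons b u => simp [pvOptJoin]
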